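-- pv_equiv track=rewrite | github.com/mrteey/miniprojects | funcs.py | order_this
-- ===== SOURCE A (Python) =====
-- def order_this(data):
--     '''
--     This function returns an ordered data.
--     :data: expects a list of strings
--     '''
--     alphabets = {}
--     data.sort()
--     for d in data:
--         if d[0] not in alphabets:
--             alphabets[d[0]] = []
--         alphabets[d[0]].append(d)
--     return alphabets
-- ===== SOURCE B (Python) =====
-- def order_this(data):
--     '''
--     This function returns an ordered data.
--     :data: expects a list of strings
--     '''
--     data.sort()
--     alphabets = {}
--     i = 0
--     n = len(data)
--     while i < n:
--         k = data[i][0]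
--         j = i + 1
--         while j < n and data[j][0] == k:
--             j += 1
--         alphabets[k] = data[i:j]
--         i = j
--     return alphabets
-- ===== Notes on version B (the rewrite author's own statement) =====
-- stated objective: alternative
-- what changed: B replaces A's dict-membership bucket accumulation with a two-pointer scan over the sorted list that finds each maximal run of equal first letters and emits it as one bucket, so the per-element 'key in dict' test disappears.
import Mathlib
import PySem

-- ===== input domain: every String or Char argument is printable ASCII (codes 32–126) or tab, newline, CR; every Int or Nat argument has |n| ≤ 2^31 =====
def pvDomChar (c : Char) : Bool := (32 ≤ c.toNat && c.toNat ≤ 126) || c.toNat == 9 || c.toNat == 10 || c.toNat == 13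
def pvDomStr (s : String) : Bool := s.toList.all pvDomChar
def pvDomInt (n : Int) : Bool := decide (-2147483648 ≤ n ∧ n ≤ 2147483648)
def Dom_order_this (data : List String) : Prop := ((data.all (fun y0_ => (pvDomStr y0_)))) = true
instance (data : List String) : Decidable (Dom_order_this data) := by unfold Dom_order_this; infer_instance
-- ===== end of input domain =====

-- B replaces A's dict-membership bucket accumulation by a two-pointer scan over the
-- sorted list that emits one whole run of equal first letters at a time (alternative
-- decomposition, same cost). Both A and B sort `data` in place (same mutation); the
-- equivalence proved here is about the return value.

-- s[0] as a one-character string; Python raises IndexError on "" (the `.getD ' '`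
-- default is unreachable inside Pre_, which excludes empty strings).
def pvKey (s : String) : String := String.singleton ((PySem.Str.pyGet? s 0).getD ' ')

-- ===== PORT A =====
def order_this (data : List String) : List (String × List String) :=
  let sortedData := PySem.List.sorted data (fun s => s)   -- data.sort()
  let alphabets : PySem.Dict String (List String) :=
    sortedData.foldl (fun alphabets d =>
      let alphabets :=
        if alphabets.contains (pvKey d) then alphabets
        else alphabets.insert (pvKey d) []               -- alphabets[d[0]] = []
      alphabets.modify (pvKey d) [] (fun l => l ++ [d])  -- alphabets[d[0]].append(d)
      ) PySem.Dict.empty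
  alphabets.items

-- ===== PORT B =====
-- the inner `while j < n and data[j][0] == k` scan = takeWhile; `data[i:j]` is that
-- run; the outer loop resumes at `i = j`, i.e. on the dropWhile remainder.
def pvGroupRuns : List String → List (String × List String)
  | [] => []
  | x :: xs =>
      let k := pvKey x
      (k, x :: xs.takeWhile (fun s => pvKey s == k)) ::
        pvGroupRuns (xs.dropWhile (fun s => pvKey s == k))
  termination_by l => l.length
  decreasing_by
    simpa using Nat.lt_succ_of_le ((List.dropWhile_sublist _).length_le)

def order_this_alt (data : List String) : List (String × List String) :=
  pvGroupRuns (PySem.List.sorted data (fun s => s))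

-- ===== PRECONDITION & SPEC =====
-- Pre_ excludes lists containing an empty string: there both A and B raise IndexError.
def Pre_order_this (data : List String) : Prop := ∀ s ∈ data, s ≠ ""
instance (data : List String) : Decidable (Pre_order_this data) := by unfold Pre_order_this; infer_instance

def pvWitness_order_this : List String := ["banana", "apple", "art", "Zed"]

def Spec_order_this (data : List String) (out : List (String × List String)) : Prop := out = order_this_alt data
instance (data : List String) (out : List (String × List String)) : Decidable (Spec_order_this data out) := by unfold Spec_order_this; infer_instance

-- ===== CLAIM (what is proved, stated in full; the proofs are below) =====
def Claim_equal_order_this : Prop := ∀ (data : List String), Dom_order_this data → Pre_order_this data → Spec_order_this data (order_this data)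

-- ===== LEMMAS AND PROOFS =====

-- the first character (' ' on "", unreachable inside Pre_)
def pvFirst (s : String) : Char := s.toList.headD ' '

-- the common canonical value: keys in first-occurrence order, each with its bucket
def pvCanon (l : List String) : List (String × List String) :=
  (PySem.Set.ofList (l.map pvKey)).map (fun k => (k, l.filter (fun s => pvKey s == k)))

theorem pvKey_eq_singleton_first (s : String) : pvKey s = String.singleton (pvFirst s) := by
  rcases h : s.toList with _ | ⟨c, cs⟩ <;>
    simp [pvKey, pvFirst, PySem.Str.pyGet?, h, PySem.Chars.pyGet?, PySem.List.pyGet?,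
      PySem.List.pyIdx?]

theorem pvKey_eq_iff (s t : String) : pvKey s = pvKey t ↔ pvFirst s = pvFirst t := by
  rw [pvKey_eq_singleton_first, pvKey_eq_singleton_first]
  constructor
  · intro h
    have := congrArg String.toList h
    simpa using this
  · intro h; rw [h]

theorem pvFirst_mono (s t : String) (hs : s ≠ "") (ht : t ≠ "") (h : s ≤ t) :
    pvFirst s ≤ pvFirst t := by
  rcases hs' : s.toList with _ | ⟨c, cs⟩
  · exact absurd (by ext1; simp [hs']) hs
  rcases ht' : t.toList with _ | ⟨d, ds⟩
  · exact absurd (by ext1; simp [ht']) ht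
  simp only [pvFirst, hs', ht', List.headD]
  rcases h.lt_or_eq with h | h
  · have h' := String.lt_iff_toList_lt.mp h
    rw [hs', ht'] at h'
    rcases (List.lt_iff_lex_lt _ _).mp h' with _ | _
    · exact le_of_lt ‹_›
    · exact le_of_eq rfl
  · subst h; simp_all

-- ---- A's loop step is a plain `modify`
theorem pvStepA (d : PySem.Dict String (List String)) (s : String) :
    (if d.contains (pvKey s) then d else d.insert (pvKey s) []).modify (pvKey s) []
        (fun l => l ++ [s]) =
      d.modify (pvKey s) [] (fun l => l ++ [s]) := by
  by_cases h : d.contains (pvKey s) = true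
  · rw [if_pos h]
  · rw [if_neg h]
    simp only [PySem.Dict.modify, PySem.Dict.getD_insert_self,
      PySem.Dict.insert_insert_self]
    rw [PySem.Dict.getD_of_not_contains d [] (by simpa using h)]

-- ---- A's result is the canonical value (no hypotheses needed on `l`)
theorem pvFoldA_eq_canon (l : List String) :
    (l.foldl (fun d s => d.modify (pvKey s) [] (fun v => v ++ [s]))
        (PySem.Dict.empty : PySem.Dict String (List String))).items = pvCanon l := by
  set D := l.foldl (fun d s => d.modify (pvKey s) [] (fun v => v ++ [s]))
      (PySem.Dict.empty : PySem.Dict String (List String)) with hD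
  have hkeys : D.keys = PySem.Set.ofList (l.map pvKey) := by
    rw [hD, PySem.Dict.keys_foldl_modify_key l pvKey [] (fun _ s => fun v => v ++ [s])]
    simp [PySem.Set.update_nil_left]
  have hnodup : D.keys.Nodup := by
    rw [hD]
    exact PySem.Dict.nodup_keys_foldl_modify_key l pvKey [] _ _ PySem.Dict.nodup_keys_empty
  have hget : ∀ c, D.getD c [] = l.filter (fun s => pvKey s == c) := by
    intro c
    have hmap : D = (l.map (fun s => (pvKey s, s))).foldl
        (fun d p => d.modify p.1 [] (fun v => v ++ [p.2])) PySem.Dict.empty := by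
      rw [hD, List.foldl_map]
    rw [hmap, PySem.Dict.getD_foldl_modify_append]
    simp [List.filter_map, Function.comp_def]
  rw [PySem.Dict.items_eq_map_keys D hnodup [], hkeys, pvCanon]
  exact List.map_congr_left (fun k _ => by rw [hget k])

-- ---- Set helpers for the run decomposition
theorem pvFoldlAdd_absorb (pre : List String) (s : PySem.Set String)
    (h : ∀ a ∈ pre, a ∈ s) : pre.foldl PySem.Set.add s = s := by
  induction pre with
  | nil => rfl
  | cons a t ih =>
      simp only [List.foldl_cons]
      rw [PySem.Set.add_of_mem (h a (by simp))]
      exact ih (fun b hb => h b (by simp [hb]))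

theorem pvFoldlAdd_cons (k : String) (rest : List String) (hk : k ∉ rest) :
    ∀ s : PySem.Set String, rest.foldl PySem.Set.add (k :: s) = k :: rest.foldl PySem.Set.add s := by
  induction rest with
  | nil => intro s; rfl
  | cons a t ih =>
      intro s
      have hak : a ≠ k := fun h => hk (by simp [h])
      have hk' : k ∉ t := fun h => hk (by simp [h])
      simp only [List.foldl_cons, PySem.Set.add_eq_ite]
      by_cases hm : a ∈ s
      · rw [if_pos (by simp [hm]), if_pos hm]
        exact ih hk' s
      · rw [if_neg (by simp [hak, hm]), if_neg hm, List.cons_append]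
        exact ih hk' (s ++ [a])

theorem pvOfList_runs (k : String) (pre rest : List String)
    (hpre : ∀ a ∈ pre, a = k) (hrest : k ∉ rest) :
    PySem.Set.ofList (k :: pre ++ rest) = k :: PySem.Set.ofList rest := by
  rw [PySem.Set.ofList_eq_foldl, PySem.Set.ofList_eq_foldl]
  simp only [List.cons_append, List.foldl_cons, List.foldl_append]
  have h1 : (PySem.Set.add [] k) = [k] := rfl
  rw [h1, pvFoldlAdd_absorb pre [k] (fun a ha => by simp [hpre a ha]),
    pvFoldlAdd_cons k rest hrest]

-- ---- B's result is the canonical value on a list sorted by first letter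
theorem pvGroupRuns_eq_canon (l : List String)
    (hp : l.Pairwise (fun a b => pvFirst a ≤ pvFirst b)) :
    pvGroupRuns l = pvCanon l := by
  induction l using pvGroupRuns.induct with
  | case1 => simp [pvGroupRuns, pvCanon]
  | case2 x xs _k ih =>
    set p := fun s => pvKey s == pvKey x with hpdef
    set run := xs.takeWhile p with hrundef
    set rest := xs.dropWhile p with hrestdef
    have hxs : run ++ rest = xs := List.takeWhile_append_dropWhile
    have hpx : ∀ s ∈ xs, pvFirst x ≤ pvFirst s :=
      fun s hs => (List.pairwise_cons.mp hp).1 s hs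
    have hpxs : xs.Pairwise (fun a b => pvFirst a ≤ pvFirst b) :=
      (List.pairwise_cons.mp hp).2
    have hrun : ∀ s ∈ run, pvKey s = pvKey x := by
      intro s hs
      have := List.mem_takeWhile_imp (hrundef ▸ hs)
      simpa [hpdef] using this
    have hrest_lt : ∀ s ∈ rest, pvFirst x < pvFirst s := by
      rcases hr : rest with _ | ⟨y, t⟩
      · intro s hs; simp at hs
      · have hy : p y = false := by
          have := List.head?_dropWhile_not p xs
          rw [← hrestdef, hr] at this
          simpa using this
        have hymem : y ∈ xs := (List.dropWhile_sublist p).mem (by rw [← hrestdef, hr]; simp)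
        have hyx : pvFirst x ≠ pvFirst y := by
          intro h
          have : pvKey y = pvKey x := (pvKey_eq_iff _ _).mpr h.symm
          simp [hpdef, this] at hy
        have hxy : pvFirst x < pvFirst y := lt_of_le_of_ne (hpx y hymem) hyx
        intro s hs
        rcases List.mem_cons.mp hs with h | h
        · exact h ▸ hxy
        · have hrp : rest.Pairwise (fun a b => pvFirst a ≤ pvFirst b) :=
            hpxs.sublist (hrestdef ▸ List.dropWhile_sublist p)
          rw [hr] at hrp
          exact lt_of_lt_of_le hxy ((List.pairwise_cons.mp hrp).1 s h)
    have hrest_ne : ∀ s ∈ rest, pvKey s ≠ pvKey x := by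
      intro s hs h
      exact absurd ((pvKey_eq_iff _ _).mp h) (ne_of_gt (hrest_lt s hs))
    -- the canonical key list splits off pvKey x
    have hofl : PySem.Set.ofList ((x :: xs).map pvKey)
        = pvKey x :: PySem.Set.ofList (rest.map pvKey) := by
      have : (x :: xs).map pvKey = pvKey x :: run.map pvKey ++ rest.map pvKey := by
        rw [← hxs]; simp
      rw [this]
      refine pvOfList_runs _ _ _ ?_ ?_
      · intro a ha
        rcases List.mem_map.mp ha with ⟨s, hs, hsk⟩
        exact hsk ▸ hrun s hs
      · intro hmem
        rcases List.mem_map.mp hmem with ⟨s, hs, hsk⟩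
        exact hrest_ne s hs hsk
    -- the first bucket
    have hfilt1 : (x :: xs).filter (fun s => pvKey s == pvKey x) = x :: run := by
      rw [← hxs, List.filter_cons, List.filter_append]
      have h1 : (pvKey x == pvKey x) = true := by simp
      rw [if_pos h1, List.filter_eq_self.mpr (fun a ha => by simp [hrun a ha]),
        List.filter_eq_nil_iff.mpr (fun a ha => by simp [hrest_ne a ha])]
      simp
    -- later buckets only draw from rest
    have hfilt2 : ∀ k' ∈ PySem.Set.ofList (rest.map pvKey),
        (x :: xs).filter (fun s => pvKey s == k') = rest.filter (fun s => pvKey s == k') := by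
      intro k' hk'
      have hk'mem : k' ∈ rest.map pvKey := (PySem.List.mem_dedup _ _).mp hk'
      rcases List.mem_map.mp hk'mem with ⟨z, hz, hzk⟩
      have hk'ne : k' ≠ pvKey x := fun h => hrest_ne z hz (hzk.trans h)
      rw [← hxs, List.filter_cons, List.filter_append]
      rw [if_neg (by simp only [beq_iff_eq]; exact fun h => hk'ne h.symm),
        List.filter_eq_nil_iff.mpr (fun a ha => by
          simp only [beq_iff_eq]
          rw [hrun a ha]
          exact fun h => hk'ne h.symm)]
      simp
    rw [pvGroupRuns]
    have hihp : rest.Pairwise (fun a b => pvFirst a ≤ pvFirst b) :=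
      hpxs.sublist (hrestdef ▸ List.dropWhile_sublist p)
    rw [ih hihp]
    show (pvKey x, x :: run) :: pvCanon rest = pvCanon (x :: xs)
    rw [pvCanon, pvCanon, hofl, List.map_cons, hfilt1]
    congr 1
    exact (List.map_congr_left (fun k' hk' => by rw [hfilt2 k' hk'])).symm

-- ===== VERDICT (by name: the statement is the Claim_ definition above) =====
theorem order_this_spec : Claim_equal_order_this := by
  intro data _ hpre
  unfold Spec_order_this order_this order_this_alt
  simp only
  have hstep : (fun (alphabets : PySem.Dict String (List String)) (d : String) =>
      (if alphabets.contains (pvKey d) then alphabets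
       else alphabets.insert (pvKey d) []).modify (pvKey d) [] (fun l => l ++ [d]))
      = fun alphabets d => alphabets.modify (pvKey d) [] (fun v => v ++ [d]) := by
    funext d s; exact pvStepA d s
  rw [hstep, pvFoldA_eq_canon]
  have hne : ∀ s ∈ PySem.List.sorted data (fun s => s), s ≠ "" :=
    fun s hs => hpre s ((PySem.List.mem_sorted data _ _ s).mp hs)
  have hle : (PySem.List.sorted data (fun s => s)).Pairwise (fun a b => a ≤ b) :=
    PySem.List.sorted_pairwise data (fun s => s)
  have hpf : (PySem.List.sorted data (fun s => s)).Pairwise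
      (fun a b => pvFirst a ≤ pvFirst b) :=
    hle.imp_of_mem (fun ha hb h => pvFirst_mono _ _ (hne _ ha) (hne _ hb) h)
  exact (pvGroupRuns_eq_canon _ hpf).symm
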